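-- pv_equiv track=rewrite | github.com/sudharsanmaran/glimcy-backend | nftion/NFT_parser.py | __cut_decimals
-- ===== SOURCE A (Python) =====
-- def __cut_decimals(number, decimals):
--     number = list(str(number))
--     while len(number) < decimals:
--         number.insert(-decimals, '0')
--     number.insert(-decimals, '.')
--     str_num = ''.join(number[0:5])
--     if str_num[0] == '.':
--         str_num = '0' + str_num
--
--     return str_num
-- ===== SOURCE B (Python) =====
-- def __cut_decimals(number, decimals):
--     s = str(number)
--     if len(s) < decimals:
--         s = '0' * (decimals - len(s)) + s
--     pos = len(s) - decimals
--     res = (s[:pos] + '.' + s[pos:])[:5]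
--     return '0' + res if res[0] == '.' else res
-- ===== Notes on version B (the rewrite author's own statement) =====
-- stated objective: faster
-- what changed: Replaces the list-of-chars while-loop of repeated insert(-decimals,'0') calls by a closed-form zero pad ('0'*(decimals-len(s))+s) and the final insert plus join by a single slice split s[:pos]+'.'+s[pos:]; Pre_ excludes negative decimals that reach strictly inside the digit string, where A's dot position is an accident of list.insert's negative-index clamping (negative decimal counts are outside the natural domain; when the clamp lands at the end both agree and the input stays admitted).
-- intended difference: For decimals == 0 A inserts the dot at position -0 == 0, i.e. at the very front, returning e.g. '0.123' for (123, 0); B places the dot after all digits ('123.'), which is the intended reading of zero decimal places. — e.g. on __cut_decimals(123, 0): A returns "0.123", B returns "123."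
-- outside the precondition, e.g. on __cut_decimals(123, -1): A returns '1.23', B returns '123.'
import Mathlib
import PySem

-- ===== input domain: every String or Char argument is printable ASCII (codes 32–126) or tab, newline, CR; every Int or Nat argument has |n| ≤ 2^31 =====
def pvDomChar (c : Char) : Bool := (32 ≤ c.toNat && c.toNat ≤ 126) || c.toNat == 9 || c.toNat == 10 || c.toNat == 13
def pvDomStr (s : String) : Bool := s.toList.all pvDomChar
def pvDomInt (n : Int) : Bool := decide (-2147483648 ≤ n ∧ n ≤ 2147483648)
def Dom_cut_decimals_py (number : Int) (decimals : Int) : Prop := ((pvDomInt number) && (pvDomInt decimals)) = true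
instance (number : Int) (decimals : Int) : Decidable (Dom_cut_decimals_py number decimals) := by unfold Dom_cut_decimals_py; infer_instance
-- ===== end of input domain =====

-- B replaces A's repeated list.insert loop by one closed-form zero pad and a single slice split (linear instead of the quadratic insert loop; measured faster in a timing run). On decimals = 0 (inside D_) B places the dot after the digits where A accidentally puts it in front.

-- ===== PORT A =====
-- the while loop: while len(number) < decimals: number.insert(-decimals, '0')
def pvCutLoop (cs : List Char) (decimals : Int) : List Char :=
  if (cs.length : Int) < decimals then
    pvCutLoop (PySem.List.insert cs (-decimals) '0') decimals
  else cs
termination_by (decimals - cs.length).toNat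
decreasing_by simp [PySem.List.length_insert]; omega

def cut_decimals_py (number : Int) (decimals : Int) : String :=
  let cs := PySem.Int.toChars number                            -- number = list(str(number))
  let cs := pvCutLoop cs decimals                               -- the while loop
  let cs := PySem.List.insert cs (-decimals) '.'                -- number.insert(-decimals, '.')
  let str_num := PySem.List.slice cs (some 0) (some 5)          -- ''.join(number[0:5]) kept as a char list
  -- str_num[0] == '.' : the list always contains '.', so index 0 never raises; pyGetD is exact here
  if PySem.List.pyGetD str_num 0 ' ' = '.' then String.ofList ('0' :: str_num) else String.ofList str_num

-- ===== PORT B =====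
def cut_decimals_py_alt (number : Int) (decimals : Int) : String :=
  let s := PySem.Int.toChars number                             -- s = str(number)
  -- if len(s) < decimals: s = '0' * (decimals - len(s)) + s
  let s := if (s.length : Int) < decimals then List.replicate (decimals - s.length).toNat '0' ++ s else s
  let pos := (s.length : Int) - decimals                        -- pos = len(s) - decimals
  -- res = (s[:pos] + '.' + s[pos:])[:5]
  let res := PySem.List.slice
      (PySem.List.slice s none (some pos) ++ '.' :: PySem.List.slice s (some pos) none)
      none (some 5)
  -- return '0' + res if res[0] == '.' else res   (res always nonempty)
  if PySem.List.pyGetD res 0 ' ' = '.' then String.ofList ('0' :: res) else String.ofList res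

-- ===== PRECONDITION & SPEC =====
-- Pre_ excludes negative decimals that reach strictly inside the digit string, where A's dot
-- position is an accident of list.insert's negative-index clamping (a negative count of decimal
-- places is outside the natural domain; when it clamps to the end both programs agree and the
-- input stays admitted).
def Pre_cut_decimals_py (number : Int) (decimals : Int) : Prop :=
  0 ≤ decimals ∨ ((PySem.Int.toChars number).length : Int) ≤ -decimals
instance (number : Int) (decimals : Int) : Decidable (Pre_cut_decimals_py number decimals) := by unfold Pre_cut_decimals_py; infer_instance
def pvWitness_cut_decimals_py : Int × Int := (123, 2)

-- For decimals == 0 A inserts the dot at index -0 == 0, i.e. at the very front (A returns '0.123'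
-- for (123, 0)); B places the dot after all digits ('123.'), the intended reading of zero decimals.
def D_cut_decimals_py (number : Int) (decimals : Int) : Prop := decimals = 0
instance (number : Int) (decimals : Int) : Decidable (D_cut_decimals_py number decimals) := by unfold D_cut_decimals_py; infer_instance

def Spec_cut_decimals_py (number : Int) (decimals : Int) (out : String) : Prop := ¬ D_cut_decimals_py number decimals → out = cut_decimals_py_alt number decimals
instance (number : Int) (decimals : Int) (out : String) : Decidable (Spec_cut_decimals_py number decimals out) := by unfold Spec_cut_decimals_py; infer_instance

def pvDiffWitness_cut_decimals_py : Int × Int := (123, 0)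
def pvDiffWitnessOut_cut_decimals_py : String × String := ("0.123", "123.")

-- ===== CLAIM (what is proved, stated in full; the proofs are below) =====
def Claim_unchanged_cut_decimals_py : Prop := ∀ (number : Int) (decimals : Int), Dom_cut_decimals_py number decimals → Pre_cut_decimals_py number decimals → Spec_cut_decimals_py number decimals (cut_decimals_py number decimals)
def Claim_changed_cut_decimals_py : Prop := Dom_cut_decimals_py (pvDiffWitness_cut_decimals_py.1) (pvDiffWitness_cut_decimals_py.2) ∧ Pre_cut_decimals_py (pvDiffWitness_cut_decimals_py.1) (pvDiffWitness_cut_decimals_py.2) ∧ D_cut_decimals_py (pvDiffWitness_cut_decimals_py.1) (pvDiffWitness_cut_decimals_py.2) ∧ cut_decimals_py (pvDiffWitness_cut_decimals_py.1) (pvDiffWitness_cut_decimals_py.2) = pvDiffWitnessOut_cut_decimals_py.1 ∧ cut_decimals_py_alt (pvDiffWitness_cut_decimals_py.1) (pvDiffWitness_cut_decimals_py.2) = pvDiffWitnessOut_cut_decimals_py.2 ∧ pvDiffWitnessOut_cut_decimals_py.1 ≠ pvDiffWitnessOut_cut_decimals_py.2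
def Claim_exact_cut_decimals_py : Prop := ∀ (number : Int) (decimals : Int), Dom_cut_decimals_py number decimals → Pre_cut_decimals_py number decimals → D_cut_decimals_py number decimals → cut_decimals_py number decimals ≠ cut_decimals_py_alt number decimals

-- ===== LEMMAS AND PROOFS =====

theorem digitChar_ne_dot (m : Nat) (h : m < 10) : Nat.digitChar m ≠ '.' := by
  interval_cases m <;> decide

theorem toDigitsCore_shape (f : Nat) : ∀ (n : Nat) (l : List Char),
    Nat.toDigitsCore 10 f n l = l ∨
      ∃ m r, m < 10 ∧ Nat.toDigitsCore 10 f n l = Nat.digitChar m :: r := by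
  induction f with
  | zero => intro n l; left; rfl
  | succ f ih =>
    intro n l
    simp only [Nat.toDigitsCore]
    split_ifs with h
    · exact Or.inr ⟨n % 10, l, Nat.mod_lt _ (by norm_num), rfl⟩
    · rcases ih (n / 10) (Nat.digitChar (n % 10) :: l) with h2 | ⟨m, r, hm, h2⟩
      · exact Or.inr ⟨n % 10, l, Nat.mod_lt _ (by norm_num), h2⟩
      · exact Or.inr ⟨m, r, hm, h2⟩

theorem toDigits_head (n : Nat) :
    ∃ m r, m < 10 ∧ Nat.toDigits 10 n = Nat.digitChar m :: r := by
  show ∃ m r, m < 10 ∧ Nat.toDigitsCore 10 (n + 1) n [] = Nat.digitChar m :: r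
  simp only [Nat.toDigitsCore]
  split_ifs with h
  · exact ⟨n % 10, [], Nat.mod_lt _ (by norm_num), rfl⟩
  · rcases toDigitsCore_shape n (n / 10) [Nat.digitChar (n % 10)] with h2 | ⟨m, r, hm, h2⟩
    · exact ⟨n % 10, [], Nat.mod_lt _ (by norm_num), h2⟩
    · exact ⟨m, r, hm, h2⟩

/-- `str(number)` is nonempty and never starts with a dot. -/
theorem toChars_head (n : Int) :
    ∃ c r, PySem.Int.toChars n = c :: r ∧ c ≠ '.' := by
  show ∃ c r, (if n < 0 then '-' :: Nat.toDigits 10 n.natAbs else Nat.toDigits 10 n.toNat) = c :: r ∧ c ≠ '.'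
  split_ifs with h
  · exact ⟨'-', Nat.toDigits 10 n.natAbs, rfl, by decide⟩
  · obtain ⟨m, r, hm, he⟩ := toDigits_head n.toNat
    exact ⟨Nat.digitChar m, r, he, digitChar_ne_dot m hm⟩

/-- Python's `xs.insert(i, v)` as a clamped take/drop split. -/
theorem pvInsert_eq (xs : List Char) (i : Int) (v : Char) :
    PySem.List.insert xs i v =
      xs.take (if i < 0 then max (i + xs.length) 0 else min i xs.length).toNat ++
        v :: xs.drop (if i < 0 then max (i + xs.length) 0 else min i xs.length).toNat := by
  simp [PySem.List.insert, PySem.List.sliceIndices]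

/-- A's while loop prepends exactly `(decimals - len).toNat` zeros. -/
theorem pvCutLoop_eq (cs : List Char) (d : Int) :
    pvCutLoop cs d = List.replicate (d - cs.length).toNat '0' ++ cs := by
  fun_induction pvCutLoop cs d with
  | case1 cs h ih =>
      have h0 : (if (-d) < 0 then max (-d + (cs.length:Int)) 0 else min (-d) cs.length).toNat = 0 := by
        split_ifs <;> omega
      rw [ih]
      simp only [pvInsert_eq, h0, List.take_zero, List.drop_zero, List.nil_append, List.length_cons]
      push_cast
      have : (d - (cs.length:Int)).toNat = (d - ((cs.length:Int) + 1)).toNat + 1 := by omega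
      rw [this, List.replicate_succ', List.append_assoc]
      simp
  | case2 cs h => simp; omega

/-- For positive `decimals`, A's padded-and-dotted char list equals B's slice split. -/
theorem cut_decimals_lists_eq (s : List Char) (decimals : Int) (hd : 0 < decimals) :
    PySem.List.insert (pvCutLoop s decimals) (-decimals) '.' =
      PySem.List.slice (if (s.length : Int) < decimals then List.replicate (decimals - s.length).toNat '0' ++ s else s) none
        (some (((if (s.length : Int) < decimals then List.replicate (decimals - s.length).toNat '0' ++ s else s).length : Int) - decimals)) ++
      '.' :: PySem.List.slice (if (s.length : Int) < decimals then List.replicate (decimals - s.length).toNat '0' ++ s else s)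
        (some (((if (s.length : Int) < decimals then List.replicate (decimals - s.length).toNat '0' ++ s else s).length : Int) - decimals)) none := by
  rw [pvCutLoop_eq, pvInsert_eq]
  set padded := if (s.length : Int) < decimals then List.replicate (decimals - s.length).toNat '0' ++ s else s with hpad
  have hlist : List.replicate (decimals - (s.length:Int)).toNat '0' ++ s = padded := by
    rw [hpad]; split_ifs with hlt
    · rfl
    · have : (decimals - (s.length:Int)).toNat = 0 := by omega
      simp [this]
  rw [hlist]
  have hlen : decimals ≤ (padded.length : Int) := by
    rw [hpad]; split_ifs with hlt
    · simp; omega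
    · omega
  have hpos : 0 ≤ (padded.length : Int) - decimals := by omega
  rw [PySem.List.slice_to _ hpos, PySem.List.slice_from _ hpos]
  have : (if -decimals < 0 then max (-decimals + (padded.length:Int)) 0 else min (-decimals) padded.length).toNat
      = ((padded.length:Int) - decimals).toNat := by split_ifs <;> omega
  rw [this]

theorem pyGetD_take_cons (n : Nat) (h : 0 < n) (y d : Char) (l : List Char) :
    PySem.List.pyGetD (List.take n (y :: l)) 0 d = y := by
  cases n with
  | zero => omega
  | succ n => simp [List.take_succ_cons, PySem.List.pyGetD]

/-- For `decimals < 0` reaching past the digits, both programs put the dot at the end. -/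
theorem cut_decimals_lists_eq_neg (s : List Char) (decimals : Int) (hd : decimals < 0)
    (hlen : (s.length : Int) ≤ -decimals) :
    PySem.List.insert (pvCutLoop s decimals) (-decimals) '.' =
      PySem.List.slice (if (s.length : Int) < decimals then List.replicate (decimals - s.length).toNat '0' ++ s else s) none
        (some (((if (s.length : Int) < decimals then List.replicate (decimals - s.length).toNat '0' ++ s else s).length : Int) - decimals)) ++
      '.' :: PySem.List.slice (if (s.length : Int) < decimals then List.replicate (decimals - s.length).toNat '0' ++ s else s)
        (some (((if (s.length : Int) < decimals then List.replicate (decimals - s.length).toNat '0' ++ s else s).length : Int) - decimals)) none := by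
  rw [pvCutLoop_eq, pvInsert_eq]
  have hrep : (decimals - (s.length : Int)).toNat = 0 := by omega
  simp only [hrep, List.replicate_zero, List.nil_append,
    if_neg (show ¬ (s.length : Int) < decimals by omega)]
  have hidx : (if -decimals < 0 then max (-decimals + (s.length : Int)) 0
      else min (-decimals) s.length).toNat = s.length := by split_ifs <;> omega
  rw [hidx]
  rw [PySem.List.slice_to _ (by omega : (0:Int) ≤ (s.length : Int) - decimals),
      PySem.List.slice_from _ (by omega : (0:Int) ≤ (s.length : Int) - decimals)]
  rw [List.take_of_length_le (by omega : s.length ≤ ((s.length : Int) - decimals).toNat),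
      List.drop_eq_nil_of_le (le_refl s.length),
      List.drop_eq_nil_of_le (by omega : s.length ≤ ((s.length : Int) - decimals).toNat)]
  simp

-- ===== VERDICT (by name: the statement is the Claim_ definition above) =====
theorem cut_decimals_py_spec : Claim_unchanged_cut_decimals_py := by
  intro number decimals _ hpre hnd
  unfold D_cut_decimals_py at hnd
  show cut_decimals_py number decimals = cut_decimals_py_alt number decimals
  unfold cut_decimals_py cut_decimals_py_alt
  simp only [PySem.List.slice_zero_start]
  rcases lt_trichotomy decimals 0 with hd | hd | hd
  · have hlen : (((PySem.Int.toChars number).length : Int)) ≤ -decimals := by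
      unfold Pre_cut_decimals_py at hpre
      rcases hpre with h | h
      · omega
      · exact h
    rw [cut_decimals_lists_eq_neg _ _ hd hlen]
  · exact absurd hd hnd
  · rw [cut_decimals_lists_eq _ _ hd]

theorem cut_decimals_py_changed : Claim_changed_cut_decimals_py := by
  unfold Claim_changed_cut_decimals_py
  refine ⟨by decide, by decide, by decide, ?_, by rfl, by decide⟩
  show cut_decimals_py 123 0 = "0.123"
  simp only [cut_decimals_py, pvCutLoop_eq]
  rfl

theorem cut_decimals_py_tight : Claim_exact_cut_decimals_py := by
  intro number decimals _ _ hD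
  unfold D_cut_decimals_py at hD
  subst hD
  obtain ⟨c, r, hcs, hc⟩ := toChars_head number
  unfold cut_decimals_py cut_decimals_py_alt
  simp only [PySem.List.slice_zero_start, pvCutLoop_eq, hcs, neg_zero]
  have hrep : ((0:Int) - (((c :: r).length : Int))).toNat = 0 := by omega
  have hif : ¬ ((((c :: r).length : Int)) < 0) := by omega
  simp only [hrep, List.replicate_zero, List.nil_append, if_neg hif, sub_zero]
  rw [pvInsert_eq]
  have h0 : (if (0:Int) < 0 then max (0 + (((c :: r).length : Int))) 0
      else min 0 (((c :: r).length : Int))).toNat = 0 := by split_ifs <;> omega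
  rw [h0]
  simp only [List.take_zero, List.drop_zero, List.nil_append]
  rw [PySem.List.slice_to _ (by omega : (0:Int) ≤ 5),
      PySem.List.slice_to _ (by omega : (0:Int) ≤ (((c :: r).length : Int))),
      PySem.List.slice_from _ (by omega : (0:Int) ≤ (((c :: r).length : Int))),
      PySem.List.slice_to _ (by omega : (0:Int) ≤ 5)]
  have hlen : ((((c :: r).length : Int))).toNat = (c :: r).length := by omega
  simp only [hlen, List.take_length, List.drop_length]
  have h5 : ((5:Int)).toNat = 5 := by omega
  simp only [h5]
  rw [pyGetD_take_cons 5 (by omega), List.cons_append, pyGetD_take_cons 5 (by omega)]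
  rw [if_pos rfl, if_neg hc]
  intro heq
  have hl := congrArg (fun s => s.toList.length) heq
  simp only [String.toList_ofList, List.length_cons, List.length_take, List.length_append,
    List.length_cons, List.length_nil] at hl
  omega
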